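-- pv_equiv track=rewrite | github.com/petertle22/CSCI_665_AlgorithmsHW | Exam1Playground/PlaygroundExam1.py | YELLOW_GREEN_INC
-- ===== SOURCE A (Python) =====
-- def YELLOW_GREEN_INC(intervals):
--     N = len(intervals)
--     memo = [0] * N
--     for j in range(N):
--         (sj, fj, cj, dj) = intervals[j]
--         memo[j] = cj
--         currentF = fj
--         colorNow = dj
--         for i in range(j + 1, N):
--             (si, fi, ci, di) = intervals[i]
--             if currentF <= si and colorNow != di:
--                 memo[j] += ci
--                 colorNow = di
--                 currentF = fi
--     return max(memo)
-- ===== SOURCE B (Python) =====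
-- def YELLOW_GREEN_INC(intervals):
--     n = len(intervals)
--     # pass 1: nxt[j] = index of the first compatible successor of j (or -1)
--     nxt = [-1] * n
--     for j in range(n):
--         s, f, c, d = intervals[j]
--         for i in range(j + 1, n):
--             si, fi, ci, di = intervals[i]
--             if f <= si and d != di:
--                 nxt[j] = i
--                 break
--     # pass 2: follow next-pointers right-to-left, total[j] = c_j + total[nxt[j]]
--     total = [0] * n
--     for j in range(n - 1, -1, -1):
--         c = intervals[j][2]
--         k = nxt[j]
--         total[j] = c + (total[k] if k >= 0 else 0)
--     return max(total)
-- ===== Notes on version B (the rewrite author's own statement) =====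
-- stated objective: alternative
-- what changed: Two staged passes: first build a next-pointer array (index of the first compatible successor per interval, found with an early break), then accumulate chain totals right-to-left via those pointers in O(n), instead of re-simulating the whole stateful greedy sweep over the full suffix from every start index.
import Mathlib
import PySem

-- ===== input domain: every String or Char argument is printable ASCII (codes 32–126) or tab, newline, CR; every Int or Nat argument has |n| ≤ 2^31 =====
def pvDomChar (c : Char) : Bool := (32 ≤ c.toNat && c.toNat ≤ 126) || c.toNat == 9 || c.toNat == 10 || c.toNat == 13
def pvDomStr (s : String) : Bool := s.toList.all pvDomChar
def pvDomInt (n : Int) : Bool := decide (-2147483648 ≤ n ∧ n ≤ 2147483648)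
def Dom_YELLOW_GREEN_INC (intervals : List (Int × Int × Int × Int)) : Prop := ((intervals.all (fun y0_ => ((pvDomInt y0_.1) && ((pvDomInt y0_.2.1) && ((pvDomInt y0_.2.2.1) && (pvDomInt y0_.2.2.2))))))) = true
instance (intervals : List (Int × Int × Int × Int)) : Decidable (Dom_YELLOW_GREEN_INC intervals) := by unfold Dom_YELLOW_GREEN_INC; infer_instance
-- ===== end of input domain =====

-- B separates successor-finding (a next-pointer pass) from weight accumulation (a
-- right-to-left totals pass over those pointers) instead of A's per-start greedy sweep.


-- ===== PORT A =====
-- inner loop 'for i in range(j+1, N)' over the suffix, state (memo[j], currentF, colorNow)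
def sweepA (acc f d : Int) : List (Int × Int × Int × Int) → Int
  | [] => acc
  | (si, fi, ci, di) :: rest =>
      if f ≤ si ∧ d ≠ di then sweepA (acc + ci) fi di rest else sweepA acc f d rest

-- outer loop 'for j in range(N)': memo[j] from intervals[j] and the suffix after it
def memosA : List (Int × Int × Int × Int) → List Int
  | [] => []
  | (_, fj, cj, dj) :: rest => sweepA cj fj dj rest :: memosA rest

def YELLOW_GREEN_INC (intervals : List (Int × Int × Int × Int)) : Int :=
  (PySem.List.max? (memosA intervals) (fun y => y)).getD 0

-- ===== PORT B =====
-- pass 1 inner loop: absolute index i of the first compatible successor, -1 if none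
def scanNext (f d : Int) (i : Int) : List (Int × Int × Int × Int) → Int
  | [] => -1
  | (si, _, _, di) :: rest => if f ≤ si ∧ d ≠ di then i else scanNext f d (i + 1) rest

-- pass 1 outer loop: nxt[j] for each j, carrying the absolute position
def nextsFrom (j : Int) : List (Int × Int × Int × Int) → List Int
  | [] => []
  | (_, f, _, d) :: rest => scanNext f d (j + 1) rest :: nextsFrom (j + 1) rest

-- pass 2 'for j in range(n-1, -1, -1)': total[j] = c_j + total[nxt[j]]; the totals of
-- positions j+1.. are the tail, so total[k] is entry (k - j - 1) of the tail
def buildTotals (j : Int) : List (Int × Int × Int × Int) → List Int → List Int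
  | (_, _, c, _) :: rest, k :: ks =>
      let ts := buildTotals (j + 1) rest ks
      (c + (if 0 ≤ k then ts.getD (k - j - 1).toNat 0 else 0)) :: ts
  | _, _ => []

def YELLOW_GREEN_INC_alt (intervals : List (Int × Int × Int × Int)) : Int :=
  (PySem.List.max? (buildTotals 0 intervals (nextsFrom 0 intervals)) (fun y => y)).getD 0

-- ===== PRECONDITION & SPEC =====
-- Pre_ excludes the empty list, on which Python's max([]) raises ValueError (in A and in B).
def Pre_YELLOW_GREEN_INC (intervals : List (Int × Int × Int × Int)) : Prop := intervals ≠ []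
instance (intervals : List (Int × Int × Int × Int)) : Decidable (Pre_YELLOW_GREEN_INC intervals) := by unfold Pre_YELLOW_GREEN_INC; infer_instance
def pvWitness_YELLOW_GREEN_INC : (List (Int × Int × Int × Int)) := [(0, 2, 5, 1), (3, 4, 2, 0)]

def Spec_YELLOW_GREEN_INC (intervals : List (Int × Int × Int × Int)) (out : Int) : Prop := out = YELLOW_GREEN_INC_alt intervals
instance (intervals : List (Int × Int × Int × Int)) (out : Int) : Decidable (Spec_YELLOW_GREEN_INC intervals out) := by unfold Spec_YELLOW_GREEN_INC; infer_instance

-- ===== CLAIM (what is proved, stated in full; the proofs are below) =====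
def Claim_equal_YELLOW_GREEN_INC : Prop := ∀ (intervals : List (Int × Int × Int × Int)), Dom_YELLOW_GREEN_INC intervals → Pre_YELLOW_GREEN_INC intervals → Spec_YELLOW_GREEN_INC intervals (YELLOW_GREEN_INC intervals)

-- ===== LEMMAS AND PROOFS =====

-- the chain value of A's greedy sweep, with the accumulator stripped off
def chain (f d : Int) : List (Int × Int × Int × Int) → Int
  | [] => 0
  | (si, fi, ci, di) :: rest =>
      if f ≤ si ∧ d ≠ di then ci + chain fi di rest else chain f d rest

theorem sweepA_eq_chain (l : List (Int × Int × Int × Int)) :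
    ∀ acc f d, sweepA acc f d l = acc + chain f d l := by
  induction l with
  | nil => intro acc f d; simp [sweepA, chain]
  | cons x rest ih =>
      intro acc f d
      obtain ⟨si, fi, ci, di⟩ := x
      by_cases h : f ≤ si ∧ d ≠ di
      · simp [sweepA, chain, h, ih]; ring
      · simp [sweepA, chain, h, ih]

theorem scanNext_bound (l : List (Int × Int × Int × Int)) :
    ∀ f d i, scanNext f d i l = -1 ∨ i ≤ scanNext f d i l := by
  induction l with
  | nil => intro f d i; simp [scanNext]
  | cons x rest ih =>
      intro f d i
      obtain ⟨si, fi, ci, di⟩ := x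
      by_cases h : f ≤ si ∧ d ≠ di
      · simp [scanNext, h]
      · simp only [scanNext, if_neg h]
        rcases ih f d (i + 1) with h1 | h1
        · exact Or.inl h1
        · exact Or.inr (by omega)

-- the next-pointer lookup into the suffix totals computes A's chain value
theorem lookup_eq_chain (l : List (Int × Int × Int × Int)) :
    ∀ i f d, 0 ≤ i →
      (if 0 ≤ scanNext f d i l
        then (memosA l).getD (scanNext f d i l - i).toNat 0 else 0) = chain f d l := by
  induction l with
  | nil => intro i f d _; simp [scanNext, chain]
  | cons x rest ih =>
      intro i f d hi
      obtain ⟨si, fi, ci, di⟩ := x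
      by_cases h : f ≤ si ∧ d ≠ di
      · simp only [scanNext, chain, if_pos h, if_pos hi]
        have : (i - i).toNat = 0 := by omega
        rw [this]
        simp [memosA, sweepA_eq_chain]
      · simp only [scanNext, chain, if_neg h, memosA]
        rcases scanNext_bound rest f d (i + 1) with hb | hb
        · rw [hb]
          rw [← ih (i + 1) f d (by omega)]
          simp [hb]
        · have h0 : (0:Int) ≤ scanNext f d (i + 1) rest := by omega
          rw [if_pos h0]
          have ht : (scanNext f d (i + 1) rest - i).toNat
              = (scanNext f d (i + 1) rest - (i + 1)).toNat + 1 := by omega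
          rw [ht]
          rw [← ih (i + 1) f d (by omega)]
          simp [h0]

theorem buildTotals_eq_memosA (l : List (Int × Int × Int × Int)) :
    ∀ j, 0 ≤ j → buildTotals j l (nextsFrom j l) = memosA l := by
  induction l with
  | nil => intro j _; rfl
  | cons x rest ih =>
      intro j hj
      obtain ⟨s, f, c, d⟩ := x
      simp only [nextsFrom, buildTotals, memosA]
      rw [ih (j + 1) (by omega)]
      rw [sub_sub, lookup_eq_chain rest (j + 1) f d (by omega)]
      rw [sweepA_eq_chain]

-- ===== VERDICT (by name: the statement is the Claim_ definition above) =====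
theorem YELLOW_GREEN_INC_spec : Claim_equal_YELLOW_GREEN_INC := by
  intro intervals _ _
  unfold Spec_YELLOW_GREEN_INC YELLOW_GREEN_INC YELLOW_GREEN_INC_alt
  rw [buildTotals_eq_memosA intervals 0 (by omega)]
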